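-- pv_equiv track=rewrite | github.com/Alkhithr/Mary | BUCI057N0/session_4/worksheet049_test2.py | sorted2
-- ===== SOURCE A (Python) =====
-- def sorted2(x, y, z):
--
--     list_in = []
--     list_sort = []
--     for n in (x, y, z):
--         list_in.append(n)
--         list_sort.append(n)
--
--     list_sort.sort()
--
--     if list_in == list_sort:
--         return True
--
--     return False
-- ===== SOURCE B (Python) =====
-- def sorted2(x, y, z):
--     return x <= y <= z
-- ===== Notes on version B (the rewrite author's own statement) =====
-- stated objective: idiomatic
-- what changed: B replaces building two lists and sorting one with a direct chained comparison x <= y <= z.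
import Mathlib
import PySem

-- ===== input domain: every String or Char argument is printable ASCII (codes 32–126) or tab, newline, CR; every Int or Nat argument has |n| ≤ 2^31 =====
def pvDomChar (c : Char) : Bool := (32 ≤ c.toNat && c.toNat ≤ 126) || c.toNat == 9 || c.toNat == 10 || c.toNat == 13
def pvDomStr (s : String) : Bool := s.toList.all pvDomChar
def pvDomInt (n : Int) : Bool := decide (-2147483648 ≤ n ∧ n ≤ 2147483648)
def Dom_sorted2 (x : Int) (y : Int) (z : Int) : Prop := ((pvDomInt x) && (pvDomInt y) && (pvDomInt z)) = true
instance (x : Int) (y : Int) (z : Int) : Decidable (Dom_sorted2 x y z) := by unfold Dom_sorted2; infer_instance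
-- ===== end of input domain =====

-- B replaces building two lists and sorting one with a direct chained comparison (idiomatic).


-- ===== PORT A =====
-- builds list_in and list_sort by appending in a loop, sorts list_sort, compares
def sorted2 (x : Int) (y : Int) (z : Int) : Bool :=
  let st := [x, y, z].foldl (fun (p : List Int × List Int) n => (p.1 ++ [n], p.2 ++ [n])) ([], [])
  let list_in := st.1
  let list_sort := PySem.List.sorted st.2 (fun a => a) false
  if list_in = list_sort then true else false

-- ===== PORT B =====
-- chained comparison x <= y <= z
def sorted2_alt (x : Int) (y : Int) (z : Int) : Bool :=
  decide (x ≤ y) && decide (y ≤ z)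

-- ===== PRECONDITION & SPEC =====
def Spec_sorted2 (x : Int) (y : Int) (z : Int) (out : Bool) : Prop := out = sorted2_alt x y z
instance (x : Int) (y : Int) (z : Int) (out : Bool) : Decidable (Spec_sorted2 x y z out) := by unfold Spec_sorted2; infer_instance

-- ===== CLAIM =====
def Claim_equal_sorted2 : Prop := ∀ (x : Int) (y : Int) (z : Int), Dom_sorted2 x y z → Spec_sorted2 x y z (sorted2 x y z)

-- ===== LEMMAS AND PROOFS =====
theorem sorted_triple_eq_iff (x y z : Int) :
    ([x, y, z] = PySem.List.sorted [x, y, z] (fun a => a) false) ↔ (x ≤ y ∧ y ≤ z) := by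
  constructor
  · intro h
    have hp := PySem.List.sorted_pairwise (xs := [x, y, z]) (key := fun a => a)
    rw [← h] at hp
    simp [List.pairwise_cons] at hp
    exact ⟨hp.1.1, hp.2⟩
  · intro ⟨h1, h2⟩
    have : ([x, y, z] : List Int).Pairwise (fun a b => (fun a : Int => a) a ≤ (fun a : Int => a) b) := by
      simp [List.pairwise_cons]
      exact ⟨⟨h1, le_trans h1 h2⟩, h2⟩
    exact (PySem.List.sorted_eq_self_of_pairwise (xs := [x, y, z]) (key := fun a => a) this).symm

-- ===== VERDICT =====
theorem sorted2_spec : Claim_equal_sorted2 := by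
  intro x y z _
  unfold Spec_sorted2 sorted2 sorted2_alt
  simp only [List.foldl]
  split_ifs with h
  · have := (sorted_triple_eq_iff x y z).mp (by simpa using h)
    simp [this.1, this.2]
  · have : ¬ (x ≤ y ∧ y ≤ z) := fun hc => h (by simpa using (sorted_triple_eq_iff x y z).mpr hc)
    by_cases h1 : x ≤ y <;> by_cases h2 : y ≤ z <;> simp_all
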